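-- pv_equiv track=rewrite | github.com/wlkaqw/python | 2527405018.py | func6
-- ===== SOURCE A (Python) =====
-- def func6(lst):
--     result = -1
--     for i in lst:
--         one = i%10
--         ten = (i//10)%10
--         hundred = i//100
--         if ten %2 == 0 and hundred %2 == 0 and (one + ten +hundred) %2 ==1 :
--             result = i
--     return result
-- ===== SOURCE B (Python) =====
-- def func6(lst):
--     for i in reversed(lst):
--         one = i % 10
--         ten = (i // 10) % 10
--         hundred = i // 100
--         if ten % 2 == 0 and hundred % 2 == 0 and (one + ten + hundred) % 2 == 1:
--             return i
--     return -1
-- ===== Notes on version B (the rewrite author's own statement) =====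
-- stated objective: simpler
-- what changed: Replaces the forward scan with an overwritten result accumulator by a reverse traversal that early-returns the first match, keeping no state between iterations.
import Mathlib
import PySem

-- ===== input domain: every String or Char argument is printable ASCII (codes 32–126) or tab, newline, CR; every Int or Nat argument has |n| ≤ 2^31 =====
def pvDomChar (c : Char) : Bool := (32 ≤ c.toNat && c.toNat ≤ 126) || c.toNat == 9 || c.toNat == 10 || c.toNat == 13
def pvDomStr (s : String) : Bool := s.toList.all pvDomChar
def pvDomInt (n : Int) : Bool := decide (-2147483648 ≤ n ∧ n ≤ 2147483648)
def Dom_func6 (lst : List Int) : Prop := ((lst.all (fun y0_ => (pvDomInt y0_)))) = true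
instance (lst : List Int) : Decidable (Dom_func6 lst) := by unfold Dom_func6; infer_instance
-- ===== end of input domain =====

-- B changes the decomposition (reverse traversal with early return instead of a forward
-- scan overwriting an accumulator); same cost, objective: simpler.

-- ===== PORT A =====
-- shared digit-parity condition (the if-test of both Pythons, ported with Python floor division/mod)
def func6Cond (i : Int) : Bool :=
  let one := PySem.Int.mod i 10
  let ten := PySem.Int.mod (PySem.Int.floordiv i 10) 10
  let hundred := PySem.Int.floordiv i 100
  PySem.Int.mod ten 2 == 0 && PySem.Int.mod hundred 2 == 0 &&
    PySem.Int.mod (one + ten + hundred) 2 == 1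

def func6 (lst : List Int) : Int :=
  lst.foldl (fun result i => if func6Cond i then i else result) (-1)

-- ===== PORT B =====
-- reverse traversal, early return on first match, no accumulator
def func6AltGo : List Int → Int
  | [] => -1
  | i :: rest => if func6Cond i then i else func6AltGo rest

def func6_alt (lst : List Int) : Int := func6AltGo lst.reverse

-- ===== PRECONDITION & SPEC =====
def Spec_func6 (lst : List Int) (out : Int) : Prop := out = func6_alt lst
instance (lst : List Int) (out : Int) : Decidable (Spec_func6 lst out) := by unfold Spec_func6; infer_instance

-- ===== CLAIM (what is proved, stated in full; the proofs are below) =====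
def Claim_equal_func6 : Prop := ∀ (lst : List Int), Dom_func6 lst → Spec_func6 lst (func6 lst)

-- ===== LEMMAS AND PROOFS =====
-- generalized form of B's scan with an explicit default, used only in the proof
def func6Go' (l : List Int) (a : Int) : Int :=
  match l with
  | [] => a
  | i :: rest => if func6Cond i then i else func6Go' rest a

theorem func6Go'_append (m n : List Int) (a : Int) :
    func6Go' (m ++ n) a = func6Go' m (func6Go' n a) := by
  induction m with
  | nil => rfl
  | cons x xs ih => simp [func6Go', ih]

theorem func6AltGo_eq (l : List Int) : func6AltGo l = func6Go' l (-1) := by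
  induction l with
  | nil => rfl
  | cons x xs ih => simp [func6AltGo, func6Go', ih]

theorem func6_foldl_eq (l : List Int) (a : Int) :
    l.foldl (fun result i => if func6Cond i then i else result) a
      = func6Go' l.reverse a := by
  induction l generalizing a with
  | nil => rfl
  | cons x xs ih =>
    simp only [List.foldl_cons, List.reverse_cons, func6Go'_append, ih]
    rfl

-- ===== VERDICT (by name: the statement is the Claim_ definition above) =====
theorem func6_spec : Claim_equal_func6 := by
  intro lst _
  unfold Spec_func6 func6 func6_alt
  rw [func6AltGo_eq, func6_foldl_eq]
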